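-- pv_equiv track=rewrite | github.com/Filigee/coding_problem_solutions | 7kyu/alphabet_wars.py | alphabet_war
-- ===== SOURCE A (Python) =====
-- def alphabet_war(fight):
--     left_dictionary = {
--         "w": 4,
--         "p": 3,
--         "b": 2,
--         "s": 1
--     }
--
--     right_dictionary = {
--         "m": 4,
--         "q": 3,
--         "d": 2,
--         "z": 1
--     }
--
--     left_sum = 0
--     right_sum = 0
--
--
--     for char in fight:
--         if char in left_dictionary:
--             left_sum += left_dictionary[char]
--         elif char in right_dictionary:
--             right_sum += right_dictionary[char]
--
--     if(left_sum > right_sum):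
--         return "Left side wins!"
--     elif(right_sum > left_sum):
--         return "Right side wins!"
--     else:
--         return "Let's fight again!"
-- ===== SOURCE B (Python) =====
-- def alphabet_war(fight):
--     score = sum(weight * fight.count(letter)
--                 for letter, weight in (("w", 4), ("p", 3), ("b", 2), ("s", 1),
--                                        ("m", -4), ("q", -3), ("d", -2), ("z", -1)))
--     if score > 0:
--         return "Left side wins!"
--     if score < 0:
--         return "Right side wins!"
--     return "Let's fight again!"
-- ===== Notes on version B (the rewrite author's own statement) =====
-- stated objective: faster
-- what changed: Replaces the per-character Python loop over two dicts with two side sums by a closed-form signed sum of eight str.count scans and a single sign test on one net score.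
import Mathlib
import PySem

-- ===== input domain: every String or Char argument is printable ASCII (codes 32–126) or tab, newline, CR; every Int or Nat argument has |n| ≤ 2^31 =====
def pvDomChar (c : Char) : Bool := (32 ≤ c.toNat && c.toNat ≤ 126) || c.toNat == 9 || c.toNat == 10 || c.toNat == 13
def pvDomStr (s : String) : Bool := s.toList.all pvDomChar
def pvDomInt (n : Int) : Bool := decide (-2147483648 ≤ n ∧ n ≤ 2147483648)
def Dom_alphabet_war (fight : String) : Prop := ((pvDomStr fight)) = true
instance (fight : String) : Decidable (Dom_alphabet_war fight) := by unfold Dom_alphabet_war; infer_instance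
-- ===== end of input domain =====

-- B replaces A's per-character loop over two dicts with two side sums by a signed sum of eight str.count scans and a single sign test on one net score (same O(n), measured constant-factor faster in Python).

-- ===== PORT A =====
def pvLeftD : PySem.Dict Char Int :=
  ((((PySem.Dict.empty).insert 'w' 4).insert 'p' 3).insert 'b' 2).insert 's' 1
def pvRightD : PySem.Dict Char Int :=
  ((((PySem.Dict.empty).insert 'm' 4).insert 'q' 3).insert 'd' 2).insert 'z' 1

def alphabet_war (fight : String) : String :=
  let sums := fight.toList.foldl (fun (p : Int × Int) c =>
      if pvLeftD.contains c then (p.1 + pvLeftD.getD c 0, p.2)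
      else if pvRightD.contains c then (p.1, p.2 + pvRightD.getD c 0)
      else p) (0, 0)
  if sums.1 > sums.2 then "Left side wins!"
  else if sums.2 > sums.1 then "Right side wins!"
  else "Let's fight again!"

-- ===== PORT B =====
def alphabet_war_alt (fight : String) : String :=
  let score : Int :=
    ([("w", (4 : Int)), ("p", 3), ("b", 2), ("s", 1),
      ("m", -4), ("q", -3), ("d", -2), ("z", -1)]).foldl
      (fun acc lw => acc + lw.2 * (PySem.Str.count fight lw.1 : Int)) 0
  if score > 0 then "Left side wins!"
  else if score < 0 then "Right side wins!"
  else "Let's fight again!"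

-- ===== PRECONDITION & SPEC =====
def Spec_alphabet_war (fight : String) (out : String) : Prop := out = alphabet_war_alt fight
instance (fight : String) (out : String) : Decidable (Spec_alphabet_war fight out) := by unfold Spec_alphabet_war; infer_instance

-- ===== CLAIM (what is proved, stated in full; the proofs are below) =====
def Claim_equal_alphabet_war : Prop := ∀ (fight : String), Dom_alphabet_war fight → Spec_alphabet_war fight (alphabet_war fight)

-- ===== LEMMAS AND PROOFS =====

-- Python s.count(sub) for a one-character sub is the character count.
theorem pv_go_single (c : Char) : ∀ (fuel : Nat) (l : List Char) (acc : Nat), l.length ≤ fuel →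
    PySem.Chars.count.go [c] fuel l acc = acc + l.count c := by
  intro fuel
  induction fuel with
  | zero => intro l acc h; cases l with
    | nil => simp [PySem.Chars.count.go]
    | cons x t => simp at h
  | succ n ih => intro l acc h; cases l with
    | nil => simp [PySem.Chars.count.go]
    | cons x t =>
      rw [PySem.Chars.count.go]
      by_cases hx : x = c
      · simp [List.isPrefixOf, hx, ih t (acc + 1) (by simpa using h)]
        omega
      · simp [List.isPrefixOf, hx, Ne.symm hx, ih t acc (by simpa using h)]

theorem pv_count_single (cs : List Char) (c : Char) :
    PySem.Chars.count cs [c] = cs.count c := by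
  simp [PySem.Chars.count, pv_go_single c cs.length cs 0 le_rfl]

theorem pv_leftD_contains (x : Char) :
    pvLeftD.contains x = ('w' == x || 'p' == x || 'b' == x || 's' == x) := by
  simp [pvLeftD, PySem.Dict.contains, PySem.Dict.insert, PySem.Dict.empty, Bool.or_assoc]

theorem pv_rightD_contains (x : Char) :
    pvRightD.contains x = ('m' == x || 'q' == x || 'd' == x || 'z' == x) := by
  simp [pvRightD, PySem.Dict.contains, PySem.Dict.insert, PySem.Dict.empty, Bool.or_assoc]

-- A's accumulator loop computes the weighted letter counts of each side.
theorem pv_foldA (cs : List Char) : ∀ (l r : Int),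
    cs.foldl (fun (p : Int × Int) c =>
      if pvLeftD.contains c then (p.1 + pvLeftD.getD c 0, p.2)
      else if pvRightD.contains c then (p.1, p.2 + pvRightD.getD c 0)
      else p) (l, r)
    = (l + 4 * (cs.count 'w' : Int) + 3 * (cs.count 'p' : Int)
         + 2 * (cs.count 'b' : Int) + (cs.count 's' : Int),
       r + 4 * (cs.count 'm' : Int) + 3 * (cs.count 'q' : Int)
         + 2 * (cs.count 'd' : Int) + (cs.count 'z' : Int)) := by
  induction cs with
  | nil => intro l r; simp
  | cons x t ih =>
    intro l r
    rw [List.foldl_cons]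
    by_cases h1 : x = 'w'
    · subst h1
      simp only [show pvLeftD.contains 'w' = true from rfl, if_true,
        show pvLeftD.getD 'w' 0 = (4:Int) from rfl, ih, List.count_cons]
      simp; try ring
    · by_cases h2 : x = 'p'
      · subst h2
        simp only [show pvLeftD.contains 'p' = true from rfl, if_true,
          show pvLeftD.getD 'p' 0 = (3:Int) from rfl, ih, List.count_cons]
        simp; try ring
      · by_cases h3 : x = 'b'
        · subst h3
          simp only [show pvLeftD.contains 'b' = true from rfl, if_true,
            show pvLeftD.getD 'b' 0 = (2:Int) from rfl, ih, List.count_cons]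
          simp; try ring
        · by_cases h4 : x = 's'
          · subst h4
            simp only [show pvLeftD.contains 's' = true from rfl, if_true,
              show pvLeftD.getD 's' 0 = (1:Int) from rfl, ih, List.count_cons]
            simp; try ring
          · by_cases h5 : x = 'm'
            · subst h5
              simp only [show pvLeftD.contains 'm' = false from rfl,
                show pvRightD.contains 'm' = true from rfl, if_true, Bool.false_eq_true,
                if_false, show pvRightD.getD 'm' 0 = (4:Int) from rfl, ih, List.count_cons]
              simp; try ring
            · by_cases h6 : x = 'q'
              · subst h6
                simp only [show pvLeftD.contains 'q' = false from rfl,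
                  show pvRightD.contains 'q' = true from rfl, if_true, Bool.false_eq_true,
                  if_false, show pvRightD.getD 'q' 0 = (3:Int) from rfl, ih, List.count_cons]
                simp; try ring
              · by_cases h7 : x = 'd'
                · subst h7
                  simp only [show pvLeftD.contains 'd' = false from rfl,
                    show pvRightD.contains 'd' = true from rfl, if_true, Bool.false_eq_true,
                    if_false, show pvRightD.getD 'd' 0 = (2:Int) from rfl, ih, List.count_cons]
                  simp; try ring
                · by_cases h8 : x = 'z'
                  · subst h8
                    simp only [show pvLeftD.contains 'z' = false from rfl,
                      show pvRightD.contains 'z' = true from rfl, if_true, Bool.false_eq_true,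
                      if_false, show pvRightD.getD 'z' 0 = (1:Int) from rfl, ih, List.count_cons]
                    simp; try ring
                  · simp only [pv_leftD_contains x, pv_rightD_contains x, List.count_cons]
                    simp [h1, h2, h3, h4, h5, h6, h7, h8, Ne.symm h1, Ne.symm h2, Ne.symm h3, Ne.symm h4, Ne.symm h5, Ne.symm h6, Ne.symm h7, Ne.symm h8, ih]

-- ===== VERDICT (by name: the statement is the Claim_ definition above) =====
theorem alphabet_war_spec : Claim_equal_alphabet_war := by
  intro fight _
  unfold Spec_alphabet_war
  simp only [alphabet_war, alphabet_war_alt, List.foldl,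
    PySem.Str.count_eq,
    show ("w" : String).toList = ['w'] from rfl, show ("p" : String).toList = ['p'] from rfl,
    show ("b" : String).toList = ['b'] from rfl, show ("s" : String).toList = ['s'] from rfl,
    show ("m" : String).toList = ['m'] from rfl, show ("q" : String).toList = ['q'] from rfl,
    show ("d" : String).toList = ['d'] from rfl, show ("z" : String).toList = ['z'] from rfl,
    pv_count_single, pv_foldA fight.toList 0 0]
  split_ifs <;> first | rfl | (exfalso; omega)
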